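-- pv_equiv track=rewrite | github.com/uppala-praveen-au7/blacknimbus | monthly_test_1.py | attack_strength
-- ===== SOURCE A (Python) =====
-- def attack_strength(lyst):
--     arr = []
--     S_const = 1
--     C_const = 2
--     C_index = 0
--     C_val = 0
--
--     for i in range(len(lyst)):
--         if lyst[i] =='C':
--             C_index += 1
--             C_val = C_const**C_index
--             arr.append(0)
--         if lyst[i] == 'S':
--             if C_val == 0:
--                 S_val = S_const
--                 arr.append(S_val)
--             else:
--                 S_val = C_val * S_const
--                 arr.append(S_val)
--     return sum(arr)
-- ===== SOURCE B (Python) =====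
-- def attack_strength(lyst):
--     # Right-to-left pass: each 'C' doubles the contribution of every 'S'
--     # to its right; an 'S' itself contributes 1. No multiplier or power
--     # of two is ever maintained.
--     acc = 0
--     for elem in reversed(lyst):
--         if elem == 'C':
--             acc *= 2
--         elif elem == 'S':
--             acc += 1
--     return acc
-- ===== Notes on version B (the rewrite author's own statement) =====
-- stated objective: simpler
-- what changed: Replaced A's forward pass that tracks a C counter, recomputes 2**C_index on each 'C' and builds a list to sum, by a single right-to-left fold that keeps only the final answer: 'S' adds 1 and each 'C' doubles the whole accumulated total of the S's to its right, so no power, counter or list exists at all.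
import Mathlib
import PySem

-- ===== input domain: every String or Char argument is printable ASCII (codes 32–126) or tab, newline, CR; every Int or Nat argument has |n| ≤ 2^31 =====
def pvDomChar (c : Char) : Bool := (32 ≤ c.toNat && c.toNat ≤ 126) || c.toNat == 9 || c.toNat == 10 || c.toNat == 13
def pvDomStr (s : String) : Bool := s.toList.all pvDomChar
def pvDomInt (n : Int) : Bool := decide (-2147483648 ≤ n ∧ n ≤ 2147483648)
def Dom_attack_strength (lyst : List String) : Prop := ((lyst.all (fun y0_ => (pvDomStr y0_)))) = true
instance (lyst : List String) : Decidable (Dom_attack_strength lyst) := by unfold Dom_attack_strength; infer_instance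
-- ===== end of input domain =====

-- B replaces A's forward pass (C counter, 2**C_index recomputation, list built then summed) by a
-- right-to-left fold in which 'S' adds 1 and 'C' doubles the total of the S's to its right (simpler, O(1) space).

-- ===== PORT A =====
-- A's loop state: C_index, C_val and the list arr being appended to; returns the final arr.
def attackGoA : List String → Nat → Int → List Int → List Int
  | [], _, _, arr => arr
  | x :: xs, ci, cv, arr =>
    let s1 : Nat × Int × List Int :=
      if x = "C" then (ci + 1, (2 : Int) ^ (ci + 1), arr ++ [0]) else (ci, cv, arr)
    let arr2 : List Int :=
      if x = "S" then
        (if s1.2.1 = 0 then s1.2.2 ++ [1] else s1.2.2 ++ [s1.2.1 * 1])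
      else s1.2.2
    attackGoA xs s1.1 s1.2.1 arr2

def attack_strength (lyst : List String) : Int :=
  (attackGoA lyst 0 0 []).sum

-- ===== PORT B =====
-- right-to-left traversal of Source B = structural recursion that folds the tail first
def attack_strength_alt : List String → Int
  | [] => 0
  | x :: xs =>
    let acc := attack_strength_alt xs
    if x = "C" then acc * 2
    else if x = "S" then acc + 1
    else acc

-- ===== PRECONDITION & SPEC =====
def Spec_attack_strength (lyst : List String) (out : Int) : Prop := out = attack_strength_alt lyst
instance (lyst : List String) (out : Int) : Decidable (Spec_attack_strength lyst out) := by unfold Spec_attack_strength; infer_instance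

-- ===== CLAIM (what is proved, stated in full; the proofs are below) =====
def Claim_equal_attack_strength : Prop := ∀ (lyst : List String), Dom_attack_strength lyst → Spec_attack_strength lyst (attack_strength lyst)

-- ===== LEMMAS AND PROOFS =====

-- the invariant: A's C_val is 0 before the first 'C' and 2^ci afterwards
def cvOf (ci : Nat) : Int := if ci = 0 then 0 else (2 : Int) ^ ci

-- A's remaining loop, started with ci previous C's, sums to arr.sum + 2^ci times B's value of the rest
theorem attackGo_eq (xs : List String) : ∀ (ci : Nat) (arr : List Int),
    (attackGoA xs ci (cvOf ci) arr).sum = arr.sum + (2 : Int) ^ ci * attack_strength_alt xs := by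
  induction xs with
  | nil => intro ci arr; simp [attackGoA, attack_strength_alt]
  | cons x xs ih =>
    intro ci arr
    by_cases hC : x = "C"
    · have h1 : cvOf (ci + 1) = (2 : Int) ^ (ci + 1) := by simp [cvOf]
      have h2 := ih (ci + 1) (arr ++ [0])
      rw [h1] at h2
      simp only [attackGoA, attack_strength_alt, hC]
      rw [← h1]
      simp only [reduceIte, h1, if_neg (by decide : ¬("C" : String) = "S")]
      rw [h2, List.sum_append]
      simp [pow_succ]
      ring
    · by_cases hS : x = "S"
      · subst hS
        by_cases hz : ci = 0
        · subst hz
          have h2 := ih 0 (arr ++ [1])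
          simp only [cvOf, reduceIte] at h2
          simp only [attackGoA, attack_strength_alt, cvOf, if_neg hC, reduceIte, h2,
            List.sum_append, List.sum_cons, List.sum_nil]
          ring
        · have hcv : cvOf ci = (2 : Int) ^ ci := by simp [cvOf, hz]
          have hne : (2 : Int) ^ ci ≠ 0 := pow_ne_zero ci (by norm_num)
          have h2 := ih ci (arr ++ [(2 : Int) ^ ci * 1])
          rw [hcv] at h2
          simp only [attackGoA, attack_strength_alt, hcv, if_neg hC, reduceIte, if_neg hne]
          rw [h2, List.sum_append]
          simp
          ring
      · simp only [attackGoA, attack_strength_alt, if_neg hC, if_neg hS]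
        exact ih ci arr

-- ===== VERDICT (by name: the statement is the Claim_ definition above) =====
theorem attack_strength_spec : Claim_equal_attack_strength := by
  intro lyst _
  unfold Spec_attack_strength attack_strength
  have := attackGo_eq lyst 0 []
  simpa [cvOf] using this
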